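-- pv_equiv track=rewrite | github.com/umcodigo/nonogram | lib.py | valid_grid
-- ===== SOURCE A (Python) =====
-- def transpose_grid(grid):
--     return [[row[i] for row in grid] for i in range(len(grid))]
--
-- def valid_grid(grid):
--     if grid == []:
--         return False
--
--     # checar linhas
--     for line in grid:
--         if sum(line) == 0:
--             return False
--
--     # checar colunas
--     tgrid = transpose_grid(grid)
--     for line in tgrid:
--         if sum(line) == 0:
--             return False
--
--     return True
-- ===== SOURCE B (Python) =====
-- def valid_grid(grid):
--     if grid == []:
--         return False
--     # rows: any all-zero-sum row invalidates (checked first, as in A)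
--     for line in grid:
--         if sum(line) == 0:
--             return False
--     # columns: accumulate running column sums instead of materializing the transpose
--     n = len(grid)
--     col_sums = [0] * n
--     for row in grid:
--         for i in range(n):
--             col_sums[i] += row[i]
--     for s in col_sums:
--         if s == 0:
--             return False
--     return True
-- ===== Notes on version B (the rewrite author's own statement) =====
-- stated objective: alternative
-- what changed: The column check folds running column sums over the rows in place of materializing the transposed grid and summing each transposed row.
import Mathlib
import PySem

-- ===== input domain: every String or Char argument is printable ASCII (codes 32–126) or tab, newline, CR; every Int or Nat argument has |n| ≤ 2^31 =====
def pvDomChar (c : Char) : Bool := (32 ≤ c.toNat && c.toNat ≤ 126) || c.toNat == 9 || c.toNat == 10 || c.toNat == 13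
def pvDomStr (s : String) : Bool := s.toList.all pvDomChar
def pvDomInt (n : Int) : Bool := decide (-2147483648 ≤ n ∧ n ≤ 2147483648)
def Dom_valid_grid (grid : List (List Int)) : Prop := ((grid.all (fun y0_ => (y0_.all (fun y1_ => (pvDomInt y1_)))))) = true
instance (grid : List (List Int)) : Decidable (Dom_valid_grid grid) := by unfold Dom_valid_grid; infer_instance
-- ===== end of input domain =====

-- B replaces A's materialized transpose by a single fold accumulating running column
-- sums (alternative decomposition, O(n) extra space instead of O(n^2)); return values agree on all of Pre_.

-- ===== PORT A =====
-- row[i] is ported with getD i 0: inside Pre_ every accessed index is in range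
-- (outside Pre_ the Python raises IndexError and nothing is claimed).
def transpose_grid (grid : List (List Int)) : List (List Int) :=
  (List.range grid.length).map (fun i => grid.map (fun row => row.getD i 0))

def valid_grid (grid : List (List Int)) : Bool :=
  if grid = [] then false
  else if grid.any (fun line => line.sum == 0) then false
  else if (transpose_grid grid).any (fun line => line.sum == 0) then false
  else true

-- ===== PORT B =====
-- col_sums[i] += row[i] ported with getD i 0, exact inside Pre_ as above.
def valid_grid_alt (grid : List (List Int)) : Bool :=
  if grid = [] then false
  else if grid.any (fun line => line.sum == 0) then false
  else
    let n := grid.length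
    let colSums := grid.foldl
      (fun acc row => (List.range n).map (fun i => acc.getD i 0 + row.getD i 0))
      (List.replicate n 0)
    if colSums.any (fun s => s == 0) then false
    else true

-- ===== PRECONDITION & SPEC =====
-- Pre_ excludes exactly the inputs on which the Python A raises IndexError:
-- ragged grids (some row shorter than len(grid)) with no all-zero-sum row.
def Pre_valid_grid (grid : List (List Int)) : Prop :=
  grid = [] ∨ (∃ row ∈ grid, row.sum = 0) ∨ (∀ row ∈ grid, grid.length ≤ row.length)
instance (grid : List (List Int)) : Decidable (Pre_valid_grid grid) := by
  unfold Pre_valid_grid; infer_instance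
def pvWitness_valid_grid : List (List Int) := [[1, 2], [3, 4]]
def Spec_valid_grid (grid : List (List Int)) (out : Bool) : Prop := out = valid_grid_alt grid
instance (grid : List (List Int)) (out : Bool) : Decidable (Spec_valid_grid grid out) := by unfold Spec_valid_grid; infer_instance

-- ===== CLAIM (what is proved, stated in full; the proofs are below) =====
def Claim_equal_valid_grid : Prop := ∀ (grid : List (List Int)), Dom_valid_grid grid → Pre_valid_grid grid → Spec_valid_grid grid (valid_grid grid)

-- ===== LEMMAS AND PROOFS =====

theorem map_range_getD (acc : List Int) :
    (List.range acc.length).map (fun i => acc.getD i 0) = acc := by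
  apply List.ext_getElem
  · simp
  · intro i h1 h2
    simp at h1 ⊢
    simp [List.getElem?_eq_getElem h1]

theorem foldl_colSums (n : Nat) (rows : List (List Int)) :
    ∀ acc : List Int, acc.length = n →
      rows.foldl (fun acc row => (List.range n).map (fun i => acc.getD i 0 + row.getD i 0)) acc
        = (List.range n).map (fun i => acc.getD i 0 + ((rows.map (fun row => row.getD i 0)).sum)) := by
  induction rows with
  | nil =>
    intro acc h
    simp only [List.foldl_nil, List.map_nil, List.sum_nil, add_zero]
    rw [← h, map_range_getD]
  | cons r rs ih =>
    intro acc h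
    simp only [List.foldl_cons]
    rw [ih _ (by simp)]
    apply List.map_congr_left
    intro i hi
    simp only [List.mem_range] at hi
    have : ((List.range n).map (fun i => acc.getD i 0 + r.getD i 0)).getD i 0
        = acc.getD i 0 + r.getD i 0 := by
      rw [List.getD_eq_getElem _ _ (by simpa using hi)]
      simp
    rw [this]
    simp [add_assoc]

-- ===== VERDICT (by name: the statement is the Claim_ definition above) =====
theorem valid_grid_spec : Claim_equal_valid_grid := by
  intro grid _ _
  unfold Spec_valid_grid
  have key : (((List.range grid.length).map (fun i => grid.map (fun row => row.getD i 0))).any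
        (fun line => line.sum == 0))
      = ((grid.foldl (fun acc row => (List.range grid.length).map (fun i => acc.getD i 0 + row.getD i 0))
          (List.replicate grid.length 0)).any (fun s => s == 0)) := by
    rw [foldl_colSums grid.length grid _ (by simp)]
    rw [List.any_map, List.any_map]
    simp [Function.comp_def]
  simp only [valid_grid, valid_grid_alt, transpose_grid, key]
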